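-- pv_equiv track=rewrite | github.com/fanjinfei/debug | test/DataFile.py | removeDead
-- ===== SOURCE A (Python) =====
-- from collections import defaultdict
--
-- def removeDead(lines):
--     while True:
--         p2c = defaultdict(int)
--         for e in lines:
--             a,b = e[0], e[-1]
--             p2c[a] += 1
--             p2c[b] += 1
--         to_del = []
--         for e in lines:
--             a,b = e[0], e[-1]
--             if p2c[a] ==1 or p2c[b] ==1:
--                 to_del.append(e)
--         if not to_del:
--             break
--         for e in to_del:
--             lines.remove(e)
--
--     return lines
-- ===== SOURCE B (Python) =====
-- def removeDead(lines):
--     # Degree peeling with a worklist: count endpoint degrees once, then repeatedly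
--     # peel edges incident to a degree-1 vertex, decrementing and queueing as we go.
--     n = len(lines)
--     deg = {}
--     adj = {}
--     for i, e in enumerate(lines):
--         a, b = e[0], e[-1]
--         deg[a] = deg.get(a, 0) + 1
--         deg[b] = deg.get(b, 0) + 1
--         adj.setdefault(a, []).append(i)
--         adj.setdefault(b, []).append(i)
--     alive = [True] * n
--     stack = [v for v, d in deg.items() if d == 1]
--     while stack:
--         v = stack.pop()
--         if deg[v] != 1:
--             continue
--         for i in adj[v]:
--             if alive[i]:
--                 alive[i] = False
--                 e = lines[i]
--                 for u in (e[0], e[-1]):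
--                     deg[u] -= 1
--                     if deg[u] == 1:
--                         stack.append(u)
--                 break
--     return [e for i, e in enumerate(lines) if alive[i]]
-- ===== Notes on version B (the rewrite author's own statement) =====
-- stated objective: alternative
-- what changed: A repeatedly recounts all degrees each round and rescans/removes matching edges from the list until stable; B counts degrees and adjacency once and peels degree-1 vertices with a worklist, decrementing degrees and marking edges dead, then filters once (A mutates the input list in place, B does not; the equivalence is about the return value).
import Mathlib
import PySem

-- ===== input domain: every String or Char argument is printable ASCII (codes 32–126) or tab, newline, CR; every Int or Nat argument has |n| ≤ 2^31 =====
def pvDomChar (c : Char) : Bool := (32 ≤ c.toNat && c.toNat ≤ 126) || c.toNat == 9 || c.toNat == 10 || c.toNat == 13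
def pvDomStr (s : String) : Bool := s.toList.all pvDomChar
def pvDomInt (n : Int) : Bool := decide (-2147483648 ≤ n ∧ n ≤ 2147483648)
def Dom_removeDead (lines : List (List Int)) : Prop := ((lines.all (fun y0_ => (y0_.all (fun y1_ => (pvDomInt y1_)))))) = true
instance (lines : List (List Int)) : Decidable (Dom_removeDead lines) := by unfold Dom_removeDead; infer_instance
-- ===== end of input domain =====

-- B replaces A's repeated full degree-recount-and-remove rounds by a one-pass worklist
-- degree peeling (count degrees and adjacency once, decrement and queue as edges die).
-- A mutates its argument in place, B does not: the equivalence proved here is about the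
-- RETURN value.

-- ===== PORT A =====
-- e[0] and e[-1]; Pre_ excludes empty rows, where Python raises IndexError
def pvA (e : List Int) : Int := (PySem.List.pyGet? e 0).getD 0
def pvB (e : List Int) : Int := (PySem.List.pyGet? e (-1)).getD 0

-- the p2c defaultdict loop body: p2c[a] += 1; p2c[b] += 1
def pvDegStepA (d : PySem.Dict Int Int) (e : List Int) : PySem.Dict Int Int :=
  let d1 := d.insert (pvA e) (d.getD (pvA e) 0 + 1)
  d1.insert (pvB e) (d1.getD (pvB e) 0 + 1)

def pvP2C (lines : List (List Int)) : PySem.Dict Int Int :=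
  lines.foldl pvDegStepA PySem.Dict.empty

-- the to_del loop
def pvToDel (p2c : PySem.Dict Int Int) (lines : List (List Int)) : List (List Int) :=
  lines.foldl (fun td e =>
    if p2c.getD (pvA e) 0 == 1 || p2c.getD (pvB e) 0 == 1 then td ++ [e] else td) []

-- lines.remove(e)  (never raises here: every to_del entry is present)
def pvStepRemove (ls : List (List Int)) (e : List Int) : List (List Int) :=
  (PySem.List.remove? ls e).getD ls

theorem pvStepRemove_length_le (ls : List (List Int)) (e : List Int) :
    (pvStepRemove ls e).length ≤ ls.length := by
  unfold pvStepRemove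
  by_cases h : e ∈ ls
  · rw [PySem.List.remove?_eq_some_erase _ _ h]
    simpa using (List.length_erase_le : (ls.erase e).length ≤ ls.length)
  · rw [(PySem.List.remove?_eq_none_iff ls e).mpr h]
    simp

theorem pvFoldRemove_length_le (td : List (List Int)) (ls : List (List Int)) :
    (td.foldl pvStepRemove ls).length ≤ ls.length := by
  induction td generalizing ls with
  | nil => simp
  | cons e t ih => exact le_trans (ih _) (pvStepRemove_length_le ls e)

theorem pvFoldRemove_length_lt (e : List Int) (t ls : List (List Int)) (he : e ∈ ls) :
    ((e :: t).foldl pvStepRemove ls).length < ls.length := by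
  simp only [List.foldl_cons]
  have h1 : (pvStepRemove ls e).length < ls.length := by
    unfold pvStepRemove
    rw [PySem.List.remove?_eq_some_erase _ _ he]
    have h2 := List.length_erase_of_mem he
    have h3 : 0 < ls.length := List.length_pos_of_mem he
    simp only [Option.getD_some]
    omega
  exact lt_of_le_of_lt (pvFoldRemove_length_le t _) h1

theorem pvToDel_sublist (p2c : PySem.Dict Int Int) (lines : List (List Int)) :
    (pvToDel p2c lines).Sublist lines := by
  unfold pvToDel
  rw [PySem.List.foldl_append_if_eq_filter]
  simpa using List.filter_sublist lines

def removeDead (lines : List (List Int)) : List (List Int) :=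
  if h : pvToDel (pvP2C lines) lines = [] then lines
  else removeDead ((pvToDel (pvP2C lines) lines).foldl pvStepRemove lines)
termination_by lines.length
decreasing_by
  rcases he : pvToDel (pvP2C lines) lines with _ | ⟨e, t⟩
  · exact absurd he h
  · have hmem : e ∈ lines := (pvToDel_sublist (pvP2C lines) lines).mem (by rw [he]; simp)
    exact pvFoldRemove_length_lt e t lines hmem

-- ===== PORT B =====
-- the init loop: degree counter and adjacency (vertex -> incident edge indices);
-- enumerate indices are nonnegative, kept as Nat
-- deg[a] = deg.get(a, 0) + 1; deg[b] = deg.get(b, 0) + 1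
def pvDegStepB (d : PySem.Dict Int Int) (e : List Int) : PySem.Dict Int Int :=
  let d1 := d.insert (pvA e) (d.getD (pvA e) 0 + 1)
  d1.insert (pvB e) (d1.getD (pvB e) 0 + 1)

-- adj.setdefault(a, []).append(i); adj.setdefault(b, []).append(i)
def pvAdjStep (j : PySem.Dict Int (List Nat)) (e : List Int) (i : Nat) : PySem.Dict Int (List Nat) :=
  (j.modify (pvA e) [] (· ++ [i])).modify (pvB e) [] (· ++ [i])

def pvInitB (lines : List (List Int)) : PySem.Dict Int Int × PySem.Dict Int (List Nat) :=
  lines.zipIdx.foldl (fun da p => (pvDegStepB da.1 p.1, pvAdjStep da.2 p.1 p.2))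
    (PySem.Dict.empty, PySem.Dict.empty)

theorem pvCountTrue_set_lt (alive : List Bool) (i : Nat) (h : alive.getD i false = true) :
    (alive.set i false).count true < alive.count true := by
  induction alive generalizing i with
  | nil => simp at h
  | cons x xs ih =>
    cases i with
    | zero =>
      simp only [List.getD_cons_zero] at h
      subst h
      simp [List.count_cons, Nat.lt_succ_iff]
    | succ n =>
      simp only [List.getD_cons_succ] at h
      have := ih n h
      simp only [List.set_cons_succ, List.count_cons]
      omega

-- the worklist loop; the Lean list 'stack' keeps Python's stack top at its HEAD
-- (push = cons, stack.pop() = take the head), so Python's append/pop order is preserved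
def pvPeel (lines : List (List Int)) (adj : PySem.Dict Int (List Nat))
    (alive : List Bool) (deg : PySem.Dict Int Int) (stack : List Int) : List Bool :=
  match stack with
  | [] => alive
  | v :: rest =>
    if deg.getD v 0 == 1 then
      match hf : (adj.getD v []).find? (fun i => alive.getD i false) with
      | some i =>
        let alive' := alive.set i false
        let e := lines.getD i []
        let deg1 := deg.insert (pvA e) (deg.getD (pvA e) 0 - 1)
        let st1 := if deg1.getD (pvA e) 0 == 1 then pvA e :: rest else rest
        let deg2 := deg1.insert (pvB e) (deg1.getD (pvB e) 0 - 1)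
        let st2 := if deg2.getD (pvB e) 0 == 1 then pvB e :: st1 else st1
        pvPeel lines adj alive' deg2 st2
      | none => pvPeel lines adj alive deg rest
    else pvPeel lines adj alive deg rest
termination_by (alive.count true, stack.length)
decreasing_by
  · have hp := List.find?_some hf
    simp only [decide_eq_true_eq] at hp
    exact Prod.Lex.left _ _ (pvCountTrue_set_lt alive i hp)
  · exact Prod.Lex.right _ (by simp)
  · exact Prod.Lex.right _ (by simp)

def removeDead_alt (lines : List (List Int)) : List (List Int) :=
  let da := pvInitB lines
  let stack0 := ((da.1.items.filter (fun p => p.2 == 1)).map (·.1)).reverse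
  let aliveF := pvPeel lines da.2 (List.replicate lines.length true) da.1 stack0
  (lines.zipIdx.filter (fun p => aliveF.getD p.2 false)).map (·.1)

-- ===== PRECONDITION & SPEC =====
-- Pre_ excludes inputs containing an empty row, on which Python A (and B) raises IndexError at e[0]
def Pre_removeDead (lines : List (List Int)) : Prop := [] ∉ lines
instance (lines : List (List Int)) : Decidable (Pre_removeDead lines) := by
  unfold Pre_removeDead; infer_instance

def pvWitness_removeDead : List (List Int) := [[1, 2], [2, 3], [3, 1], [3, 7]]

def Spec_removeDead (lines : List (List Int)) (out : List (List Int)) : Prop := out = removeDead_alt lines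
instance (lines : List (List Int)) (out : List (List Int)) : Decidable (Spec_removeDead lines out) := by
  unfold Spec_removeDead; infer_instance

-- ===== CLAIM (what is proved, stated in full; the proofs are below) =====
def Claim_equal_removeDead : Prop := ∀ (lines : List (List Int)), Dom_removeDead lines → Pre_removeDead lines → Spec_removeDead lines (removeDead lines)

-- ===== LEMMAS AND PROOFS =====

-- the degree of vertex v: how many endpoint slots of L equal v
def degL (L : List (List Int)) (v : Int) : Nat :=
  (L.map (fun e => (if pvA e = v then 1 else 0) + (if pvB e = v then 1 else 0))).sum

-- an edge incident to a degree-1 vertex (what a round of A deletes)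
def BadE (L : List (List Int)) (e : List Int) : Prop :=
  degL L (pvA e) = 1 ∨ degL L (pvB e) = 1

def badB (L : List (List Int)) (e : List Int) : Bool :=
  (degL L (pvA e) == 1) || (degL L (pvB e) == 1)

theorem badB_iff (L : List (List Int)) (e : List Int) : badB L e = true ↔ BadE L e := by
  unfold badB BadE
  rw [Bool.or_eq_true_iff, beq_iff_eq, beq_iff_eq]

def ClosedL (L : List (List Int)) : Prop := ∀ e ∈ L, ¬ BadE L e

-- one peeling step: erase one edge incident to a degree-1 vertex
inductive StepL : List (List Int) → List (List Int) → Prop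
  | erase {L : List (List Int)} (e : List Int) (hm : e ∈ L) (hb : BadE L e) :
      StepL L (L.erase e)

def StepsL (L L' : List (List Int)) : Prop := Relation.ReflTransGen StepL L L'

theorem degL_cons (e : List Int) (L : List (List Int)) (v : Int) :
    degL (e :: L) v = ((if pvA e = v then 1 else 0) + (if pvB e = v then 1 else 0)) + degL L v := by
  simp [degL]

theorem degL_mono {L' L : List (List Int)} (h : L'.Sublist L) (v : Int) :
    degL L' v ≤ degL L v :=
  List.Sublist.sum_le_sum (h.map _) (fun a _ => Nat.zero_le a)

theorem contrib_le_degL {e : List Int} {L : List (List Int)} (h : e ∈ L) (v : Int) :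
    ((if pvA e = v then 1 else 0) + (if pvB e = v then 1 else 0)) ≤ degL L v := by
  induction L with
  | nil => simp at h
  | cons f t ih =>
    rcases List.mem_cons.mp h with rfl | hm
    · rw [degL_cons]; omega
    · rw [degL_cons]; have := ih hm; omega

theorem degL_pos_of_mem {e : List Int} {L : List (List Int)} {v : Int}
    (h : e ∈ L) (hv : pvA e = v ∨ pvB e = v) : 1 ≤ degL L v := by
  have hc := contrib_le_degL h v
  rcases hv with h1 | h1 <;> rw [h1] at hc <;> split_ifs at hc <;> omega

theorem count_le_degL {e : List Int} (L : List (List Int)) {v : Int}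
    (hv : pvA e = v ∨ pvB e = v) : L.count e ≤ degL L v := by
  induction L with
  | nil => simp [degL]
  | cons f t ih =>
    rw [degL_cons, List.count_cons]
    by_cases hfe : e = f
    · subst hfe
      have h1 : 1 ≤ (if pvA e = v then 1 else 0) + (if pvB e = v then 1 else 0) := by
        rcases hv with h | h <;> rw [h] <;> rw [if_pos rfl] <;> omega
      rw [if_pos (beq_self_eq_true e)]
      omega
    · rw [if_neg (by simpa using fun h => hfe h.symm)]
      omega

theorem count_eq_one_of_bad {L : List (List Int)} {e : List Int}
    (hm : e ∈ L) (hb : BadE L e) : L.count e = 1 := by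
  have h1 : 0 < L.count e := List.count_pos_iff.mpr hm
  rcases hb with h | h
  · have := count_le_degL L (Or.inl rfl) (e := e); omega
  · have := count_le_degL L (Or.inr rfl) (e := e); omega

theorem degL_erase {L : List (List Int)} {e : List Int} (hm : e ∈ L) (v : Int) :
    degL (L.erase e) v
      = degL L v - ((if pvA e = v then 1 else 0) + (if pvB e = v then 1 else 0)) := by
  induction L with
  | nil => simp at hm
  | cons f t ih =>
    by_cases hfe : f = e
    · subst hfe
      rw [List.erase_cons_head, degL_cons]
      omega
    · rw [List.erase_cons_tail (by simpa using hfe)]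
      have hmt : e ∈ t := by
        rcases List.mem_cons.mp hm with h | h
        · exact absurd h.symm hfe
        · exact h
      rw [degL_cons, degL_cons, ih hmt]
      have hc := contrib_le_degL hmt v
      omega

theorem not_mem_closed {C L : List (List Int)} {e : List Int}
    (hC : ClosedL C) (hs : C.Sublist L) (hb : BadE L e) : e ∉ C := by
  intro hmC
  apply hC e hmC
  rcases hb with h | h
  · left
    have h1 := degL_mono hs (pvA e)
    have h2 := degL_pos_of_mem hmC (Or.inl rfl)
    omega
  · right
    have h1 := degL_mono hs (pvB e)
    have h2 := degL_pos_of_mem hmC (Or.inr rfl)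
    omega

theorem stepL_sublist {L L' : List (List Int)} (h : StepL L L') : L'.Sublist L := by
  cases h with
  | erase e hm hb => exact List.erase_sublist

theorem stepsL_sublist {L L' : List (List Int)} (h : StepsL L L') : L'.Sublist L := by
  induction h with
  | refl => exact List.Sublist.refl _
  | tail hstep hsub ih => exact (stepL_sublist hsub).trans ih

theorem closed_sublist_step {C L L' : List (List Int)}
    (hC : ClosedL C) (hs : C.Sublist L) (h : StepL L L') : C.Sublist L' := by
  cases h with
  | erase e hm hb =>
    have hne : e ∉ C := not_mem_closed hC hs hb
    have h1 : C.erase e = C := List.erase_of_not_mem hne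
    have h2 := List.Sublist.erase e hs
    rwa [h1] at h2

theorem closed_sublist_steps {C L R : List (List Int)}
    (hC : ClosedL C) (hs : C.Sublist L) (h : StepsL L R) : C.Sublist R := by
  induction h with
  | refl => exact hs
  | tail hsteps hstep ih => exact closed_sublist_step hC ih hstep

theorem nf_unique {L R1 R2 : List (List Int)}
    (h1 : StepsL L R1) (hc1 : ClosedL R1) (h2 : StepsL L R2) (hc2 : ClosedL R2) :
    R1 = R2 :=
  List.Sublist.antisymm
    (closed_sublist_steps hc1 (stepsL_sublist h1) h2)
    (closed_sublist_steps hc2 (stepsL_sublist h2) h1)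

-- ---------- A side ----------

theorem getD_degStepA (d : PySem.Dict Int Int) (e : List Int) (v : Int) :
    (pvDegStepA d e).getD v 0
      = d.getD v 0 + (if pvA e = v then 1 else 0) + (if pvB e = v then 1 else 0) := by
  unfold pvDegStepA
  simp only [PySem.Dict.getD_insert]
  generalize pvA e = a
  generalize pvB e = b
  split_ifs <;> subst_vars <;> omega

theorem getD_foldDegA (L : List (List Int)) :
    ∀ (d : PySem.Dict Int Int) (v : Int),
      (L.foldl pvDegStepA d).getD v 0 = d.getD v 0 + (degL L v : Int) := by
  induction L with
  | nil => intro d v; simp [degL]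
  | cons e t ih =>
    intro d v
    rw [List.foldl_cons, ih, getD_degStepA, degL_cons]
    push_cast
    omega

theorem pvP2C_getD (lines : List (List Int)) (v : Int) :
    (pvP2C lines).getD v 0 = (degL lines v : Int) := by
  unfold pvP2C
  rw [getD_foldDegA]
  simp [PySem.Dict.getD_empty]

theorem pvToDel_eq_filter (lines : List (List Int)) :
    pvToDel (pvP2C lines) lines = lines.filter (badB lines) := by
  unfold pvToDel
  rw [PySem.List.foldl_append_if_eq_filter]
  rw [List.nil_append]
  apply List.filter_congr
  intro e _
  have hcast : ∀ n : Nat, (((n : Int)) == (1 : Int)) = (n == 1) := by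
    intro n
    by_cases hn : n = 1
    · subst hn; rfl
    · rw [beq_eq_false_iff_ne.mpr (by exact_mod_cast hn),
          beq_eq_false_iff_ne.mpr hn]
  simp only [pvP2C_getD, badB, hcast]

theorem roundSteps : ∀ (td L : List (List Int)), td.Sublist L → (∀ e ∈ td, BadE L e) →
    StepsL L (td.foldl pvStepRemove L) := by
  intro td
  induction td with
  | nil => intro L _ _; exact Relation.ReflTransGen.refl
  | cons e t ih =>
    intro L hs hb
    have hmem : e ∈ L := hs.mem (List.mem_cons_self)
    have hbe : BadE L e := hb e (List.mem_cons_self)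
    have hstep : StepL L (L.erase e) := StepL.erase e hmem hbe
    have hsub' : t.Sublist (L.erase e) := by
      have h := List.Sublist.erase e hs
      rwa [List.erase_cons_head] at h
    have hb' : ∀ e' ∈ t, BadE (L.erase e) e' := by
      intro e' he'
      have hm' : e' ∈ L.erase e := hsub'.mem he'
      rcases hb e' (List.mem_cons_of_mem _ he') with h | h
      · left
        have h1 := degL_mono (List.erase_sublist (a := e) (l := L)) (pvA e')
        have h2 := degL_pos_of_mem hm' (Or.inl rfl)
        omega
      · right
        have h1 := degL_mono (List.erase_sublist (a := e) (l := L)) (pvB e')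
        have h2 := degL_pos_of_mem hm' (Or.inr rfl)
        omega
    rw [List.foldl_cons,
        show pvStepRemove L e = L.erase e by
          unfold pvStepRemove; rw [PySem.List.remove?_eq_some_erase _ _ hmem]; rfl]
    exact Relation.ReflTransGen.head hstep (ih _ hsub' hb')

theorem removeDead_steps (lines : List (List Int)) :
    StepsL lines (removeDead lines) ∧ ClosedL (removeDead lines) := by
  fun_induction removeDead lines with
  | case1 lines h =>
    constructor
    · exact Relation.ReflTransGen.refl
    · intro e he hbad
      rw [pvToDel_eq_filter] at h
      have := List.filter_eq_nil_iff.mp h e he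
      exact this ((badB_iff _ _).mpr hbad)
  | case2 lines h ih =>
    have hsub : (pvToDel (pvP2C lines) lines).Sublist lines := pvToDel_sublist _ _
    have hbad : ∀ e ∈ pvToDel (pvP2C lines) lines, BadE lines e := by
      intro e he
      rw [pvToDel_eq_filter] at he
      have := List.mem_filter.mp he
      exact (badB_iff _ _).mp this.2
    exact ⟨Relation.ReflTransGen.trans (roundSteps _ _ hsub hbad) ih.1, ih.2⟩

-- ---------- B side ----------

def keepL : List (List Int) → List Bool → List (List Int)
  | [], _ => []
  | _ :: _, [] => []
  | l :: ls, true :: as => l :: keepL ls as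
  | _ :: ls, false :: as => keepL ls as

theorem keepL_nil_right (ls : List (List Int)) : keepL ls [] = [] := by
  cases ls <;> rfl

theorem keepL_replicate (ls : List (List Int)) :
    keepL ls (List.replicate ls.length true) = ls := by
  induction ls with
  | nil => rfl
  | cons l t ih =>
    show keepL (l :: t) (List.replicate (t.length + 1) true) = l :: t
    rw [List.replicate_succ]
    show l :: keepL t (List.replicate t.length true) = l :: t
    rw [ih]

theorem mem_keepL {ls : List (List Int)} {as : List Bool} {e : List Int}
    (h : e ∈ keepL ls as) :
    ∃ i, ∃ hi : i < ls.length, as.getD i false = true ∧ ls[i] = e := by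
  induction ls generalizing as with
  | nil => simp [keepL] at h
  | cons l t ih =>
    cases as with
    | nil => rw [keepL_nil_right] at h; simp at h
    | cons a as =>
      cases a with
      | false =>
        simp only [keepL] at h
        obtain ⟨i, hi, h1, h2⟩ := ih (as := as) (by simpa using h)
        exact ⟨i + 1, by simpa using hi, by simpa using h1, by simpa using h2⟩
      | true =>
        simp only [keepL, if_pos] at h
        rcases List.mem_cons.mp h with rfl | hm
        · exact ⟨0, by simp, by simp, by simp⟩
        · obtain ⟨i, hi, h1, h2⟩ := ih (as := as) hm
          exact ⟨i + 1, by simpa using hi, by simpa using h1, by simpa using h2⟩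

theorem mem_keepL_of (ls : List (List Int)) (as : List Bool) (i : Nat)
    (hi : i < ls.length) (ha : as.getD i false = true) : ls[i] ∈ keepL ls as := by
  induction ls generalizing as i with
  | nil => simp at hi
  | cons l t ih =>
    cases as with
    | nil => simp at ha
    | cons a as =>
      cases i with
      | zero =>
        simp only [List.getD_cons_zero] at ha
        subst ha
        simp [keepL]
      | succ n =>
        simp only [List.getD_cons_succ] at ha
        have := ih as n (by simpa using hi) ha
        cases a <;> simp [keepL, this]

theorem keepL_set {ls : List (List Int)} {as : List Bool} {i : Nat}
    (hi : i < ls.length) (ha : as.getD i false = true)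
    (hcount : (keepL ls as).count ls[i] = 1) :
    keepL ls (as.set i false) = (keepL ls as).erase ls[i] := by
  induction ls generalizing as i with
  | nil => simp at hi
  | cons l t ih =>
    cases as with
    | nil => simp at ha
    | cons a as =>
      cases i with
      | zero =>
        simp only [List.getD_cons_zero] at ha
        subst ha
        simp only [List.set_cons_zero, List.getElem_cons_zero]
        show keepL t as = (l :: keepL t as).erase l
        rw [List.erase_cons_head]
      | succ n =>
        simp only [List.getD_cons_succ] at ha
        have hn : n < t.length := by simpa using hi
        have hgl : (l :: t)[n + 1] = t[n] := by simp
        rw [hgl] at hcount ⊢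
        cases a with
        | false =>
          show keepL t (as.set n false) = (keepL t as).erase t[n]
          exact ih hn ha (by simpa [keepL] using hcount)
        | true =>
          have hcount' : (l :: keepL t as).count t[n] = 1 := by
            simpa [keepL] using hcount
          have hmem : t[n] ∈ keepL t as := mem_keepL_of t as n hn ha
          have hpos : 0 < (keepL t as).count t[n] := List.count_pos_iff.mpr hmem
          have hne : ¬ (l = t[n]) := by
            intro hle
            rw [List.count_cons, if_pos (by simp [hle])] at hcount'
            omega
          show l :: keepL t (as.set n false) = (l :: keepL t as).erase t[n]
          rw [List.erase_cons_tail (by simpa using hne)]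
          have hc2 : (keepL t as).count t[n] = 1 := by
            rw [List.count_cons,
                if_neg (by simpa using hne)] at hcount'
            simpa using hcount'
          rw [ih hn ha hc2]

theorem exists_endpoint_of_degL_pos {L : List (List Int)} {v : Int}
    (h : 0 < degL L v) : ∃ e ∈ L, pvA e = v ∨ pvB e = v := by
  induction L with
  | nil => simp [degL] at h
  | cons f t ih =>
    rw [degL_cons] at h
    by_cases h1 : pvA f = v
    · exact ⟨f, List.mem_cons_self, Or.inl h1⟩
    · by_cases h2 : pvB f = v
      · exact ⟨f, List.mem_cons_self, Or.inr h2⟩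
      · simp [h1, h2] at h
        obtain ⟨e, he, hv⟩ := ih h
        exact ⟨e, List.mem_cons_of_mem _ he, hv⟩

theorem filter_zipIdx_keepL (ls : List (List Int)) :
    ∀ (k : Nat) (as : List Bool),
    ((ls.zipIdx k).filter (fun p => as.getD p.2 false)).map (·.1) = keepL ls (as.drop k) := by
  induction ls with
  | nil => intro k as; simp [keepL]
  | cons l t ih =>
    intro k as
    rw [List.zipIdx_cons, List.filter_cons]
    by_cases hk : k < as.length
    · have hg : as.getD k false = as[k] := List.getD_eq_getElem _ _ hk
      rw [List.drop_eq_getElem_cons hk]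
      cases hbk : as[k] with
      | false =>
        rw [if_neg (by show ¬ (as.getD (l, k).2 false = true); rw [show ((l, k).2 : Nat) = k from rfl, hg, hbk]; simp)]
        show _ = keepL (l :: t) (false :: as.drop (k + 1))
        rw [show keepL (l :: t) (false :: as.drop (k + 1)) = keepL t (as.drop (k + 1)) from rfl]
        exact ih (k + 1) as
      | true =>
        rw [if_pos (by show as.getD (l, k).2 false = true; rw [show ((l, k).2 : Nat) = k from rfl, hg, hbk])]
        show _ = keepL (l :: t) (true :: as.drop (k + 1))
        rw [show keepL (l :: t) (true :: as.drop (k + 1)) = l :: keepL t (as.drop (k + 1)) from rfl]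
        rw [List.map_cons]
        rw [ih (k + 1) as]
    · have h1 : as.getD k false = false := by
        rw [List.getD_eq_getElem?_getD, List.getElem?_eq_none (by omega)]
        rfl
      have h2 : as.drop k = [] := List.drop_eq_nil_of_le (by omega)
      have h3 : as.drop (k + 1) = [] := List.drop_eq_nil_of_le (by omega)
      rw [if_neg (by show ¬ (as.getD (l, k).2 false = true); rw [show ((l, k).2 : Nat) = k from rfl, h1]; simp)]
      rw [h2, keepL_nil_right]
      have := ih (k + 1) as
      rw [h3, keepL_nil_right] at this
      exact this

-- init: projections of the fold
theorem pvInitB_fold (ps : List ((List Int) × Nat)) :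
    ∀ (d : PySem.Dict Int Int) (j : PySem.Dict Int (List Nat)),
      ps.foldl (fun da p => (pvDegStepB da.1 p.1, pvAdjStep da.2 p.1 p.2)) (d, j)
        = ((ps.map (·.1)).foldl pvDegStepB d,
           ps.foldl (fun j p => pvAdjStep j p.1 p.2) j) := by
  induction ps with
  | nil => intro d j; rfl
  | cons p ps ih => intro d j; rw [List.foldl_cons, ih]; rfl

theorem map_fst_zipIdx (ls : List (List Int)) : ∀ k, (ls.zipIdx k).map (·.1) = ls := by
  induction ls with
  | nil => intro k; rfl
  | cons l t ih => intro k; rw [List.zipIdx_cons, List.map_cons, ih]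

theorem getD_degStepB (d : PySem.Dict Int Int) (e : List Int) (v : Int) :
    (pvDegStepB d e).getD v 0
      = d.getD v 0 + (if pvA e = v then 1 else 0) + (if pvB e = v then 1 else 0) := by
  unfold pvDegStepB
  simp only [PySem.Dict.getD_insert]
  generalize pvA e = a
  generalize pvB e = b
  split_ifs <;> subst_vars <;> omega

theorem getD_foldDegB (L : List (List Int)) :
    ∀ (d : PySem.Dict Int Int) (v : Int),
      (L.foldl pvDegStepB d).getD v 0 = d.getD v 0 + (degL L v : Int) := by
  induction L with
  | nil => intro d v; simp [degL]
  | cons e t ih =>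
    intro d v
    rw [List.foldl_cons, ih, getD_degStepB, degL_cons]
    push_cast
    omega

theorem pvInitB_fst_getD (lines : List (List Int)) (v : Int) :
    (pvInitB lines).1.getD v 0 = (degL lines v : Int) := by
  unfold pvInitB
  rw [pvInitB_fold, map_fst_zipIdx]
  simp only
  rw [getD_foldDegB]
  simp [PySem.Dict.getD_empty]

-- the adjacency fold, as one modify per (vertex, index) pair
theorem adjFold_eq (ps : List ((List Int) × Nat)) :
    ∀ (j : PySem.Dict Int (List Nat)),
      ps.foldl (fun j p => pvAdjStep j p.1 p.2) j
        = (ps.flatMap (fun p => [(pvA p.1, p.2), (pvB p.1, p.2)])).foldl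
            (fun d q => d.modify q.1 [] (· ++ [q.2])) j := by
  induction ps with
  | nil => intro j; rfl
  | cons p ps ih =>
    intro j
    rw [List.foldl_cons, ih, List.flatMap_cons, List.foldl_append]
    rfl

theorem adj_getD (lines : List (List Int)) (v : Int) :
    (pvInitB lines).2.getD v []
      = ((lines.zipIdx.flatMap (fun p => [(pvA p.1, p.2), (pvB p.1, p.2)])).filter
          (fun q => q.1 == v)).map (·.2) := by
  unfold pvInitB
  rw [pvInitB_fold]
  simp only
  rw [adjFold_eq, PySem.Dict.getD_foldl_modify_append]
  simp [PySem.Dict.getD_empty]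

theorem mem_adj_iff (lines : List (List Int)) (v : Int) (i : Nat) :
    i ∈ (pvInitB lines).2.getD v []
      ↔ ∃ hi : i < lines.length, (pvA lines[i] = v ∨ pvB lines[i] = v) := by
  rw [adj_getD]
  constructor
  · intro h
    obtain ⟨q, hq, hq2⟩ := List.mem_map.mp h
    have hqf := List.mem_filter.mp hq
    obtain ⟨p, hp, hqp⟩ := List.mem_flatMap.mp hqf.1
    have hv : q.1 = v := beq_iff_eq.mp hqf.2
    obtain ⟨pe, pi⟩ := p
    obtain ⟨hk, hlt, hx⟩ := List.mem_zipIdx (x := pe) (i := pi) (k := 0) hp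
    have hlt' : pi < lines.length := by omega
    have hip : i = pi := by
      rcases List.mem_cons.mp hqp with h1 | h1
      · rw [h1] at hq2; exact hq2.symm
      · rcases List.mem_cons.mp h1 with h2 | h2
        · rw [h2] at hq2; exact hq2.symm
        · simp at h2
    subst hip
    refine ⟨hlt', ?_⟩
    have hx' : pe = lines[i] := by simpa using hx
    rcases List.mem_cons.mp hqp with h1 | h1
    · left; rw [← hx']; rw [h1] at hv; simpa using hv
    · rcases List.mem_cons.mp h1 with h2 | h2
      · right; rw [← hx']; rw [h2] at hv; simpa using hv
      · simp at h2
  · intro ⟨hi, hv⟩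
    apply List.mem_map.mpr
    have hp : (lines[i], i) ∈ lines.zipIdx 0 := by
      apply List.mem_iff_getElem.mpr
      exact ⟨i, by simpa using hi, by simp⟩
    rcases hv with h1 | h1
    · exact ⟨(v, i), List.mem_filter.mpr
        ⟨List.mem_flatMap.mpr ⟨(lines[i], i), hp, by rw [← h1]; simp⟩, by simp⟩, rfl⟩
    · exact ⟨(v, i), List.mem_filter.mpr
        ⟨List.mem_flatMap.mpr ⟨(lines[i], i), hp, by rw [← h1]; simp⟩, by simp⟩, rfl⟩

theorem contains_of_getD_ne {d : PySem.Dict Int Int} {v : Int}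
    (h : d.getD v 0 ≠ 0) : d.contains v = true := by
  by_cases hc : d.contains v = true
  · exact hc
  · have := PySem.Dict.getD_of_not_contains (d := d) (k := v) (d0 := (0 : Int))
      (by simpa using hc)
    exact absurd this h

theorem mem_stack0 {lines : List (List Int)} {v : Int} (h : degL lines v = 1) :
    v ∈ (((pvInitB lines).1.items.filter (fun p => p.2 == 1)).map (·.1)).reverse := by
  rw [List.mem_reverse]
  have hg : (pvInitB lines).1.getD v 0 = 1 := by rw [pvInitB_fst_getD, h]; rfl
  have hc : (pvInitB lines).1.contains v = true := contains_of_getD_ne (by rw [hg]; omega)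
  have hsome : ∃ w, (pvInitB lines).1.get? v = some w := by
    have := PySem.Dict.contains_eq_isSome_get? (pvInitB lines).1 v
    rw [hc] at this
    exact Option.isSome_iff_exists.mp this.symm
  obtain ⟨w, hw⟩ := hsome
  have hw1 : w = 1 := by
    have := PySem.Dict.getD_of_get?_eq_some (pvInitB lines).1 (0 : Int) hw
    rw [hg] at this
    omega
  subst hw1
  have hitems : (v, (1 : Int)) ∈ (pvInitB lines).1.items :=
    PySem.Dict.mem_items_of_get?_eq_some (pvInitB lines).1 hw
  exact List.mem_map.mpr ⟨(v, 1), List.mem_filter.mpr ⟨hitems, by simp⟩, rfl⟩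

-- unfolding equations for the worklist loop
theorem pvPeel_eq_nil (lines : List (List Int)) (adj : PySem.Dict Int (List Nat))
    (alive : List Bool) (deg : PySem.Dict Int Int) :
    pvPeel lines adj alive deg [] = alive := by
  rw [pvPeel.eq_def]

theorem pvPeel_eq_skip (lines : List (List Int)) (adj : PySem.Dict Int (List Nat))
    (alive : List Bool) (deg : PySem.Dict Int Int) (v : Int) (rest : List Int)
    (h : ¬ (deg.getD v 0 == 1) = true) :
    pvPeel lines adj alive deg (v :: rest) = pvPeel lines adj alive deg rest := by
  rw [pvPeel.eq_def]
  simp only []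
  rw [if_neg h]

theorem pvPeel_eq_some (lines : List (List Int)) (adj : PySem.Dict Int (List Nat))
    (alive : List Bool) (deg : PySem.Dict Int Int) (v : Int) (rest : List Int) (i : Nat)
    (hg : (deg.getD v 0 == 1) = true)
    (hf : List.find? (fun i => alive.getD i false) (adj.getD v []) = some i) :
    pvPeel lines adj alive deg (v :: rest) =
      pvPeel lines adj (alive.set i false)
        (((deg.insert (pvA (lines.getD i []))
              (deg.getD (pvA (lines.getD i [])) 0 - 1))).insert (pvB (lines.getD i []))
            ((deg.insert (pvA (lines.getD i []))
              (deg.getD (pvA (lines.getD i [])) 0 - 1)).getD (pvB (lines.getD i [])) 0 - 1))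
        (if ((deg.insert (pvA (lines.getD i []))
              (deg.getD (pvA (lines.getD i [])) 0 - 1)).insert (pvB (lines.getD i []))
            ((deg.insert (pvA (lines.getD i []))
              (deg.getD (pvA (lines.getD i [])) 0 - 1)).getD (pvB (lines.getD i [])) 0 - 1)).getD
              (pvB (lines.getD i [])) 0 == 1 then
           pvB (lines.getD i []) ::
             (if (deg.insert (pvA (lines.getD i []))
                  (deg.getD (pvA (lines.getD i [])) 0 - 1)).getD (pvA (lines.getD i [])) 0 == 1 then
                pvA (lines.getD i []) :: rest else rest)
         else
           (if (deg.insert (pvA (lines.getD i []))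
                (deg.getD (pvA (lines.getD i [])) 0 - 1)).getD (pvA (lines.getD i [])) 0 == 1 then
              pvA (lines.getD i []) :: rest else rest)) := by
  rw [pvPeel.eq_def]
  simp only []
  rw [if_pos hg]
  split
  · next i' heq =>
      rw [hf] at heq
      have : i = i' := by injection heq
      subst this
      rfl
  · next heq => rw [hf] at heq; exact absurd heq (by simp)

-- the worklist loop invariant
theorem pvPeel_spec (lines : List (List Int)) (adj : PySem.Dict Int (List Nat))
    (hadj : ∀ v i, i ∈ adj.getD v []
      ↔ ∃ hi : i < lines.length, (pvA lines[i] = v ∨ pvB lines[i] = v)) :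
    ∀ (alive : List Bool) (deg : PySem.Dict Int Int) (stack : List Int),
    alive.length = lines.length →
    (∀ v, deg.getD v 0 = (degL (keepL lines alive) v : Int)) →
    (∀ v, degL (keepL lines alive) v = 1 → v ∈ stack) →
    StepsL (keepL lines alive) (keepL lines (pvPeel lines adj alive deg stack)) ∧
    ClosedL (keepL lines (pvPeel lines adj alive deg stack)) := by
  intro alive deg stack
  refine pvPeel.induct lines adj
    (motive := fun alive deg stack =>
      alive.length = lines.length →
      (∀ v, deg.getD v 0 = (degL (keepL lines alive) v : Int)) →
      (∀ v, degL (keepL lines alive) v = 1 → v ∈ stack) →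
      StepsL (keepL lines alive) (keepL lines (pvPeel lines adj alive deg stack)) ∧
      ClosedL (keepL lines (pvPeel lines adj alive deg stack)))
    ?_ ?_ ?_ ?_ alive deg stack
  · -- stack = []
    intro alive deg _ _ hstack
    rw [pvPeel_eq_nil]
    refine ⟨Relation.ReflTransGen.refl, ?_⟩
    intro e _ hbad
    rcases hbad with h | h <;> simpa using hstack _ h
  · -- guard holds, an alive incident edge is found
    intro alive deg v rest hg i hf
    refine fun ih => ?_
    simp only [dite_eq_ite] at ih
    intro hlen hdeg hstack
    rw [pvPeel_eq_some lines adj alive deg v rest i hg hf]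
    have hpred : alive.getD i false = true := by simpa using List.find?_some hf
    have hmemadj : i ∈ adj.getD v [] := List.mem_of_find?_eq_some hf
    obtain ⟨hi, hvend⟩ := (hadj v i).mp hmemadj
    have hgetD : lines.getD i [] = lines[i] := List.getD_eq_getElem _ _ hi
    have hmemK : lines.getD i [] ∈ keepL lines alive := by
      rw [hgetD]; exact mem_keepL_of lines alive i hi hpred
    have hdegv : degL (keepL lines alive) v = 1 := by
      have h1 := hdeg v
      have h2 := beq_iff_eq.mp hg
      rw [h2] at h1
      exact_mod_cast h1.symm
    have hvend0 : pvA (lines.getD i []) = v ∨ pvB (lines.getD i []) = v := by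
      rw [hgetD]; exact hvend
    have hbadK : BadE (keepL lines alive) (lines.getD i []) := by
      rcases hvend0 with h | h
      · exact Or.inl (h ▸ hdegv)
      · exact Or.inr (h ▸ hdegv)
    have hab : pvA (lines.getD i []) ≠ pvB (lines.getD i []) := by
      intro hEq
      have hc := contrib_le_degL hmemK v
      rcases hvend0 with h | h
      · have h2 : pvB (lines.getD i []) = v := by rw [← hEq]; exact h
        rw [if_pos h, if_pos h2] at hc
        omega
      · have h2 : pvA (lines.getD i []) = v := by rw [hEq]; exact h
        rw [if_pos h2, if_pos h] at hc
        omega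
    have hcount : (keepL lines alive).count (lines.getD i []) = 1 :=
      count_eq_one_of_bad hmemK hbadK
    have hkeepset : keepL lines (alive.set i false)
        = (keepL lines alive).erase (lines.getD i []) := by
      rw [hgetD]
      rw [hgetD] at hcount
      exact keepL_set hi hpred hcount
    have hstep : StepL (keepL lines alive) ((keepL lines alive).erase (lines.getD i [])) :=
      StepL.erase _ hmemK hbadK
    have hca : 1 ≤ degL (keepL lines alive) (pvA (lines.getD i [])) :=
      degL_pos_of_mem hmemK (Or.inl rfl)
    have hcb : 1 ≤ degL (keepL lines alive) (pvB (lines.getD i [])) :=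
      degL_pos_of_mem hmemK (Or.inr rfl)
    -- the degree of w after erasing the edge
    have hdegK' : ∀ w, degL (keepL lines (alive.set i false)) w
        = degL (keepL lines alive) w
          - ((if pvA (lines.getD i []) = w then 1 else 0)
             + (if pvB (lines.getD i []) = w then 1 else 0)) := by
      intro w
      rw [hkeepset, degL_erase hmemK]
    have hdeg1a : (deg.insert (pvA (lines.getD i []))
        (deg.getD (pvA (lines.getD i [])) 0 - 1)).getD (pvA (lines.getD i [])) 0
        = (degL (keepL lines alive) (pvA (lines.getD i [])) : Int) - 1 := by
      rw [PySem.Dict.getD_insert, if_pos rfl, hdeg]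
    have hdeg2b : ((deg.insert (pvA (lines.getD i []))
        (deg.getD (pvA (lines.getD i [])) 0 - 1)).insert (pvB (lines.getD i []))
          ((deg.insert (pvA (lines.getD i []))
            (deg.getD (pvA (lines.getD i [])) 0 - 1)).getD (pvB (lines.getD i [])) 0 - 1)).getD
          (pvB (lines.getD i [])) 0
        = (degL (keepL lines alive) (pvB (lines.getD i [])) : Int) - 1 := by
      rw [PySem.Dict.getD_insert, if_pos rfl, PySem.Dict.getD_insert,
          if_neg (fun h => hab h.symm), hdeg]
    -- the updated dict agrees with the degrees after the erase
    have hdeg' : ∀ w, ((deg.insert (pvA (lines.getD i []))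
        (deg.getD (pvA (lines.getD i [])) 0 - 1)).insert (pvB (lines.getD i []))
          ((deg.insert (pvA (lines.getD i []))
            (deg.getD (pvA (lines.getD i [])) 0 - 1)).getD (pvB (lines.getD i [])) 0 - 1)).getD w 0
        = (degL (keepL lines (alive.set i false)) w : Int) := by
      intro w
      rw [hdegK' w]
      rw [PySem.Dict.getD_insert, PySem.Dict.getD_insert, PySem.Dict.getD_insert]
      by_cases hwb : w = pvB (lines.getD i [])
      · rw [if_pos hwb, if_neg (fun h => hab h.symm), hdeg]
        subst hwb
        rw [if_neg hab, if_pos rfl]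
        have := hca
        push_cast
        omega
      · rw [if_neg hwb]
        by_cases hwa : w = pvA (lines.getD i [])
        · rw [if_pos hwa, hdeg]
          subst hwa
          rw [if_pos rfl, if_neg (fun h => hwb h.symm)]
          push_cast
          omega
        · rw [if_neg hwa, hdeg]
          rw [if_neg (fun h => hwa h.symm), if_neg (fun h => hwb h.symm)]
          push_cast
          omega
    have hlen' : (alive.set i false).length = lines.length := by simpa using hlen
    -- every degree-1 vertex of the smaller graph is on the new stack
    have hstack' : ∀ w, degL (keepL lines (alive.set i false)) w = 1 →
        w ∈ (if ((deg.insert (pvA (lines.getD i []))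
              (deg.getD (pvA (lines.getD i [])) 0 - 1)).insert (pvB (lines.getD i []))
            ((deg.insert (pvA (lines.getD i []))
              (deg.getD (pvA (lines.getD i [])) 0 - 1)).getD (pvB (lines.getD i [])) 0 - 1)).getD
              (pvB (lines.getD i [])) 0 == 1 then
           pvB (lines.getD i []) ::
             (if (deg.insert (pvA (lines.getD i []))
                  (deg.getD (pvA (lines.getD i [])) 0 - 1)).getD (pvA (lines.getD i [])) 0 == 1 then
                pvA (lines.getD i []) :: rest else rest)
         else
           (if (deg.insert (pvA (lines.getD i []))
                (deg.getD (pvA (lines.getD i [])) 0 - 1)).getD (pvA (lines.getD i [])) 0 == 1 then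
              pvA (lines.getD i []) :: rest else rest)) := by
      intro w hw
      by_cases hwb : w = pvB (lines.getD i [])
      · subst hwb
        have : ((deg.insert (pvA (lines.getD i []))
            (deg.getD (pvA (lines.getD i [])) 0 - 1)).insert (pvB (lines.getD i []))
              ((deg.insert (pvA (lines.getD i []))
                (deg.getD (pvA (lines.getD i [])) 0 - 1)).getD (pvB (lines.getD i [])) 0 - 1)).getD
              (pvB (lines.getD i [])) 0 = 1 := by
          rw [hdeg2b]
          have h2 := hdegK' (pvB (lines.getD i []))
          rw [if_neg hab, if_pos rfl] at h2
          rw [hw] at h2  -- hmm wrong direction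
          omega
        rw [if_pos (beq_iff_eq.mpr this)]
        exact List.mem_cons_self
      · by_cases hwa : w = pvA (lines.getD i [])
        · subst hwa
          have h1 : (deg.insert (pvA (lines.getD i []))
              (deg.getD (pvA (lines.getD i [])) 0 - 1)).getD (pvA (lines.getD i [])) 0 = 1 := by
            rw [hdeg1a]
            have h2 := hdegK' (pvA (lines.getD i []))
            rw [if_pos rfl, if_neg (fun h => hab h.symm)] at h2
            rw [hw] at h2
            omega
          rw [if_pos (beq_iff_eq.mpr h1)]
          split_ifs
          · exact List.mem_cons_of_mem _ List.mem_cons_self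
          · exact List.mem_cons_self
        · have hwold : degL (keepL lines alive) w = 1 := by
            have h2 := hdegK' w
            rw [if_neg (fun h => hwa h.symm), if_neg (fun h => hwb h.symm)] at h2
            omega
          have hwrest : w ∈ rest := by
            have := hstack w hwold
            rcases List.mem_cons.mp this with h | h
            · exfalso
              subst h
              rcases hvend0 with h1 | h1
              · exact hwa h1.symm
              · exact hwb h1.symm
            · exact h
          split_ifs <;> simp [hwrest]
    obtain ⟨hs, hc⟩ := ih hlen' hdeg' hstack'
    refine ⟨?_, hc⟩
    rw [hkeepset] at hs
    exact Relation.ReflTransGen.head hstep hs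
  · -- guard holds but no alive incident edge: impossible under the invariant
    intro alive deg v rest hg hf _
    intro hlen hdeg hstack
    exfalso
    have hdegv : degL (keepL lines alive) v = 1 := by
      have h1 := hdeg v
      have h2 := beq_iff_eq.mp hg
      rw [h2] at h1
      exact_mod_cast h1.symm
    obtain ⟨e, heK, hev⟩ := exists_endpoint_of_degL_pos (by omega : 0 < degL (keepL lines alive) v)
    obtain ⟨j, hj, haj, hje⟩ := mem_keepL heK
    have hmemadj : j ∈ adj.getD v [] := (hadj v j).mpr ⟨hj, by rw [hje]; exact hev⟩
    exact absurd (by simpa using haj) (List.find?_eq_none.mp hf j hmemadj)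
  · -- guard fails
    intro alive deg v rest hg ih
    intro hlen hdeg hstack
    rw [pvPeel_eq_skip lines adj alive deg v rest hg]
    apply ih hlen hdeg
    intro w hw
    have := hstack w hw
    rcases List.mem_cons.mp this with h | h
    · exfalso
      apply hg
      subst h
      rw [hdeg w, hw]
      decide
    · exact h

theorem removeDead_alt_steps (lines : List (List Int)) :
    StepsL lines (removeDead_alt lines) ∧ ClosedL (removeDead_alt lines) := by
  have h := pvPeel_spec lines (pvInitB lines).2 (mem_adj_iff lines)
      (List.replicate lines.length true) (pvInitB lines).1
      ((((pvInitB lines).1.items.filter (fun p => p.2 == 1)).map (·.1)).reverse)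
      (by simp)
      (by intro v; rw [pvInitB_fst_getD, keepL_replicate])
      (by intro v hv; rw [keepL_replicate] at hv; exact mem_stack0 hv)
  rw [keepL_replicate] at h
  unfold removeDead_alt
  simp only []
  rw [filter_zipIdx_keepL lines 0 _]
  rw [List.drop_zero]
  exact h

-- ===== VERDICT (by name: the statement is the Claim_ definition above) =====
theorem removeDead_spec : Claim_equal_removeDead := by
  intro lines _ _
  show removeDead lines = removeDead_alt lines
  obtain ⟨hs1, hc1⟩ := removeDead_steps lines
  obtain ⟨hs2, hc2⟩ := removeDead_alt_steps lines
  exact nf_unique hs1 hc1 hs2 hc2
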